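-- pv_equiv track=rewrite | github.com/ojayWillow/goat-data-analyst | backend/ai/ai_engine.py | _rule_based_action_plan
-- ===== SOURCE A (Python) =====
-- from typing import Optional, Dict, Any, List
--
-- def _rule_based_action_plan(pain_points: List[Dict]) -> List[str]:
--     """Fallback rule-based action plan"""
--     steps = []
--
--     # Sort by severity
--     sorted_points = sorted(
--         pain_points,
--         key=lambda x: {"critical": 4, "high": 3, "medium": 2, "low": 1}.get(x.get("severity", "low"), 1),
--         reverse=True
--     )
--
--     for i, point in enumerate(sorted_points[:5], 1):
--         steps.append(f"{i}. {point.get('fix', 'Address: ' + point.get('issue', 'Unknown issue'))}")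
--
--     return steps
-- ===== SOURCE B (Python) =====
-- from typing import Optional, Dict, Any, List
--
-- def _rule_based_action_plan(pain_points: List[Dict]) -> List[str]:
--     """Fallback rule-based action plan (grouped filter passes instead of a sort)"""
--     rank = {"critical": 4, "high": 3, "medium": 2, "low": 1}
--     ordered = [p for r in (4, 3, 2, 1)
--                for p in pain_points
--                if rank.get(p.get("severity", "low"), 1) == r]
--     return [f"{i}. " + p.get("fix", "Address: " + p.get("issue", "Unknown issue"))
--             for i, p in enumerate(ordered[:5], 1)]
-- ===== Notes on version B (the rewrite author's own statement) =====
-- stated objective: alternative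
-- what changed: Replaces the reverse stable comparison sort with four stable filter passes (one per severity rank, concatenated in descending order) and builds the numbered lines by a comprehension over the first five, instead of an enumerate/append loop.
import Mathlib
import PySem

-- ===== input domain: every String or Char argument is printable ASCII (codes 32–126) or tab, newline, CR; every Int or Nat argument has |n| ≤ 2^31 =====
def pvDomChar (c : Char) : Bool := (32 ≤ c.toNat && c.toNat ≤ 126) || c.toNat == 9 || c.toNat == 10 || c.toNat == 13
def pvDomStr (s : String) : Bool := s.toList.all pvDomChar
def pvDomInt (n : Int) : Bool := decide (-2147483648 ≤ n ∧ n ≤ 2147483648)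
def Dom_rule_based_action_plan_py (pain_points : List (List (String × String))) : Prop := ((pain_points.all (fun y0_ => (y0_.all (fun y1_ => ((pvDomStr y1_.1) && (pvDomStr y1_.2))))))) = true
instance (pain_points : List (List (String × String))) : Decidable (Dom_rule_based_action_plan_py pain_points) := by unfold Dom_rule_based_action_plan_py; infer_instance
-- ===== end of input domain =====

-- One honest line: B replaces the reverse stable sort with four stable filter passes
-- (descending severity rank) and numbers the first five by a comprehension; same output.

-- ===== PORT A =====
-- d.get(k, dflt) on an association list (first match wins), hand-rolled as A's dict lookups
def pvGet {V : Type} (d : List (String × V)) (k : String) (dflt : V) : V :=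
  ((d.find? (fun e => e.1 == k)).map (fun e => e.2)).getD dflt

-- {"critical": 4, "high": 3, "medium": 2, "low": 1}.get(point.get("severity", "low"), 1)
def pvKey (point : List (String × String)) : Int :=
  pvGet [("critical", 4), ("high", 3), ("medium", 2), ("low", 1)]
    (pvGet point "severity" "low") 1

-- point.get('fix', 'Address: ' + point.get('issue', 'Unknown issue'))
def pvFmt (point : List (String × String)) : String :=
  pvGet point "fix" ("Address: " ++ pvGet point "issue" "Unknown issue")

def rule_based_action_plan_py (pain_points : List (List (String × String))) : List String :=
  let sorted_points := PySem.List.sorted pain_points pvKey true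
  (PySem.List.enumerate (PySem.List.slice sorted_points none (some 5)) 1).foldl
    (fun steps ip => steps ++ [PySem.Int.toStr ip.1 ++ ". " ++ pvFmt ip.2]) []

-- ===== PORT B =====
-- B's dict lookups go through PySem.Dict (same first-match semantics, different code path)
def altRank : PySem.Dict String Int :=
  PySem.Dict.mk [("critical", 4), ("high", 3), ("medium", 2), ("low", 1)]

def altKey (point : List (String × String)) : Int :=
  altRank.getD ((PySem.Dict.mk point).getD "severity" "low") 1

def altFmt (point : List (String × String)) : String :=
  (PySem.Dict.mk point).getD "fix"
    ("Address: " ++ (PySem.Dict.mk point).getD "issue" "Unknown issue")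

-- ordered = [p for r in (4,3,2,1) for p in pain_points if rank.get(..) == r]
def altOrdered (pain_points : List (List (String × String))) : List (List (String × String)) :=
  ([4, 3, 2, 1] : List Int).flatMap (fun r => pain_points.filter (fun p => altKey p == r))

-- [f"{i}. " + ... for i, p in enumerate(ordered[:5], 1)] as a counting recursion
def altNumber : Int → List (List (String × String)) → List String
  | _, [] => []
  | i, p :: ps => (PySem.Int.toStr i ++ ". " ++ altFmt p) :: altNumber (i + 1) ps

def rule_based_action_plan_py_alt (pain_points : List (List (String × String))) : List String :=
  altNumber 1 ((altOrdered pain_points).take 5)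

-- ===== PRECONDITION & SPEC =====
def Spec_rule_based_action_plan_py (pain_points : List (List (String × String))) (out : List String) : Prop := out = rule_based_action_plan_py_alt pain_points
instance (pain_points : List (List (String × String))) (out : List String) : Decidable (Spec_rule_based_action_plan_py pain_points out) := by unfold Spec_rule_based_action_plan_py; infer_instance

-- ===== CLAIM =====
def Claim_equal_rule_based_action_plan_py : Prop := ∀ (pain_points : List (List (String × String))), Dom_rule_based_action_plan_py pain_points → Spec_rule_based_action_plan_py pain_points (rule_based_action_plan_py pain_points)

-- ===== LEMMAS AND PROOFS =====

-- PySem.Dict.getD on a literal assoc list is the first-match lookup pvGet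
lemma altGetD_eq_pvGet (l : List (String × String)) (k d : String) :
    (PySem.Dict.mk l).getD k d = pvGet l k d := by
  induction l with
  | nil => rfl
  | cons h t ih =>
      rw [PySem.Dict.getD_eq_get?_getD, PySem.Dict.get?_mk_cons]
      unfold pvGet
      rw [List.find?]
      by_cases hk : h.1 == k
      · simp [hk]
      · simp only [hk, Bool.false_eq_true, if_neg, not_false_eq_true]
        rw [← PySem.Dict.getD_eq_get?_getD, ih]
        rfl

lemma altKey_eq_pvKey (p : List (String × String)) : altKey p = pvKey p := by
  unfold altKey pvKey altRank
  rw [altGetD_eq_pvGet]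
  have : ∀ (k : String),
      (PySem.Dict.mk [("critical", (4:Int)), ("high", 3), ("medium", 2), ("low", 1)]).getD k 1
        = pvGet [("critical", 4), ("high", 3), ("medium", 2), ("low", 1)] k 1 := by
    intro k
    rw [show (pvGet [("critical", (4:Int)), ("high", 3), ("medium", 2), ("low", 1)] k 1)
        = (((([("critical", (4:Int)), ("high", 3), ("medium", 2), ("low", 1)]).find?
            (fun e => e.1 == k)).map (fun e => e.2)).getD 1) from rfl]
    rw [PySem.Dict.getD_eq_get?_getD]
    simp only [PySem.Dict.get?_mk_cons, List.find?]
    by_cases h1 : ("critical" : String) == k <;> by_cases h2 : ("high" : String) == k <;>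
      by_cases h3 : ("medium" : String) == k <;> by_cases h4 : ("low" : String) == k <;>
      simp [h1, h2, h3, h4, PySem.Dict.get?]
  exact this _

lemma altFmt_eq_pvFmt (p : List (String × String)) : altFmt p = pvFmt p := by
  unfold altFmt pvFmt
  rw [altGetD_eq_pvGet, altGetD_eq_pvGet]

lemma pvRankGet_cases (s : String) :
    pvGet [("critical", (4:Int)), ("high", 3), ("medium", 2), ("low", 1)] s 1 = 4 ∨
    pvGet [("critical", (4:Int)), ("high", 3), ("medium", 2), ("low", 1)] s 1 = 3 ∨
    pvGet [("critical", (4:Int)), ("high", 3), ("medium", 2), ("low", 1)] s 1 = 2 ∨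
    pvGet [("critical", (4:Int)), ("high", 3), ("medium", 2), ("low", 1)] s 1 = 1 := by
  unfold pvGet
  simp only [List.find?]
  cases "critical" == s <;> cases "high" == s <;> cases "medium" == s <;>
    cases "low" == s <;> simp

lemma pvKey_cases (p : List (String × String)) :
    pvKey p = 4 ∨ pvKey p = 3 ∨ pvKey p = 2 ∨ pvKey p = 1 :=
  pvRankGet_cases _

lemma pv_insertBy_hi_lo (x : List (String × String)) :
    ∀ (hi lo : List (List (String × String))),
    (∀ y ∈ hi, ¬ pvKey y < pvKey x) → (∀ y ∈ lo, pvKey y < pvKey x) →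
    PySem.List.insertBy (fun a b => decide (pvKey b < pvKey a)) x (hi ++ lo)
      = hi ++ x :: lo := by
  intro hi
  induction hi with
  | nil =>
      intro lo _ hlo
      cases lo with
      | nil => simp [PySem.List.insertBy]
      | cons y ys =>
          have := hlo y (by simp)
          simp [PySem.List.insertBy, this]
  | cons h t ih =>
      intro lo hhi hlo
      have hh := hhi h (by simp)
      simp only [List.cons_append, PySem.List.insertBy]
      rw [if_neg (by simpa using hh)]
      rw [ih lo (fun y hy => hhi y (by simp [hy])) hlo]

def pvF4 (xs : List (List (String × String))) := xs.filter (fun p => pvKey p == 4)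
def pvF3 (xs : List (List (String × String))) := xs.filter (fun p => pvKey p == 3)
def pvF2 (xs : List (List (String × String))) := xs.filter (fun p => pvKey p == 2)
def pvF1 (xs : List (List (String × String))) :=
  xs.filter (fun p => !(pvKey p == 4) && !(pvKey p == 3) && !(pvKey p == 2))

lemma pv_sorted_eq_buckets (xs : List (List (String × String))) :
    PySem.List.sorted xs pvKey true = pvF4 xs ++ pvF3 xs ++ pvF2 xs ++ pvF1 xs := by
  rw [PySem.List.sorted_rev_eq_foldl_insertBy]
  induction xs using List.reverseRecOn with
  | nil => simp [pvF4, pvF3, pvF2, pvF1]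
  | append_singleton xs x ih =>
      rw [List.foldl_append, List.foldl_cons, List.foldl_nil, ih]
      have hmem4 : ∀ y ∈ pvF4 xs, pvKey y = 4 := by
        intro y hy; simpa using (List.of_mem_filter hy)
      have hmem3 : ∀ y ∈ pvF3 xs, pvKey y = 3 := by
        intro y hy; simpa using (List.of_mem_filter hy)
      have hmem2 : ∀ y ∈ pvF2 xs, pvKey y = 2 := by
        intro y hy; simpa using (List.of_mem_filter hy)
      have hmem1 : ∀ y ∈ pvF1 xs, pvKey y = 1 := by
        intro y hy
        have h := List.of_mem_filter hy
        simp only [Bool.and_eq_true, Bool.not_eq_true', beq_eq_false_iff_ne] at h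
        rcases pvKey_cases y with h' | h' | h' | h' <;> simp_all
      have hfilt4 : pvF4 (xs ++ [x]) = pvF4 xs ++ (if pvKey x == 4 then [x] else []) := by
        simp [pvF4, List.filter_append]; split_ifs <;> simp_all
      have hfilt3 : pvF3 (xs ++ [x]) = pvF3 xs ++ (if pvKey x == 3 then [x] else []) := by
        simp [pvF3, List.filter_append]; split_ifs <;> simp_all
      have hfilt2 : pvF2 (xs ++ [x]) = pvF2 xs ++ (if pvKey x == 2 then [x] else []) := by
        simp [pvF2, List.filter_append]; split_ifs <;> simp_all
      have hfilt1 : pvF1 (xs ++ [x]) = pvF1 xs ++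
          (if !(pvKey x == 4) && !(pvKey x == 3) && !(pvKey x == 2) then [x] else []) := by
        simp [pvF1, List.filter_append]; split_ifs <;> simp_all
      rcases pvKey_cases x with hx | hx | hx | hx
      · have := pv_insertBy_hi_lo x (pvF4 xs) (pvF3 xs ++ pvF2 xs ++ pvF1 xs)
          (by intro y hy; rw [hmem4 y hy, hx]; omega)
          (by intro y hy
              rw [hx]
              rcases List.mem_append.1 hy with hy | hy
              · rcases List.mem_append.1 hy with hy | hy
                · rw [hmem3 y hy]; omega
                · rw [hmem2 y hy]; omega
              · rw [hmem1 y hy]; omega)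
        simpa [hfilt4, hfilt3, hfilt2, hfilt1, hx, List.append_assoc] using this
      · have := pv_insertBy_hi_lo x (pvF4 xs ++ pvF3 xs) (pvF2 xs ++ pvF1 xs)
          (by intro y hy; rw [hx]
              rcases List.mem_append.1 hy with hy | hy
              · rw [hmem4 y hy]; omega
              · rw [hmem3 y hy]; omega)
          (by intro y hy; rw [hx]
              rcases List.mem_append.1 hy with hy | hy
              · rw [hmem2 y hy]; omega
              · rw [hmem1 y hy]; omega)
        simpa [hfilt4, hfilt3, hfilt2, hfilt1, hx, List.append_assoc] using this
      · have := pv_insertBy_hi_lo x (pvF4 xs ++ pvF3 xs ++ pvF2 xs) (pvF1 xs)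
          (by intro y hy; rw [hx]
              rcases List.mem_append.1 hy with hy | hy
              · rcases List.mem_append.1 hy with hy | hy
                · rw [hmem4 y hy]; omega
                · rw [hmem3 y hy]; omega
              · rw [hmem2 y hy]; omega)
          (by intro y hy; rw [hx, hmem1 y hy]; omega)
        simpa [hfilt4, hfilt3, hfilt2, hfilt1, hx, List.append_assoc] using this
      · have := pv_insertBy_hi_lo x (pvF4 xs ++ pvF3 xs ++ pvF2 xs ++ pvF1 xs) []
          (by intro y hy; rw [hx]
              rcases List.mem_append.1 hy with hy | hy
              · rcases List.mem_append.1 hy with hy | hy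
                · rcases List.mem_append.1 hy with hy | hy
                  · rw [hmem4 y hy]; omega
                  · rw [hmem3 y hy]; omega
                · rw [hmem2 y hy]; omega
              · rw [hmem1 y hy]; omega)
          (by intro y hy; simp at hy)
        simpa [hfilt4, hfilt3, hfilt2, hfilt1, hx, List.append_assoc] using this

-- B's four filter passes produce exactly the bucket concatenation
lemma altOrdered_eq_buckets (xs : List (List (String × String))) :
    altOrdered xs = pvF4 xs ++ pvF3 xs ++ pvF2 xs ++ pvF1 xs := by
  unfold altOrdered
  simp only [List.flatMap_cons, List.flatMap_nil, List.append_nil, altKey_eq_pvKey,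
    List.append_assoc]
  rw [show xs.filter (fun p => pvKey p == (1:Int)) = pvF1 xs from
    List.filter_congr (fun p _ => by
      rcases pvKey_cases p with h | h | h | h <;> simp [h])]
  simp [pvF4, pvF3, pvF2]

-- A's enumerate-and-append loop is B's counting recursion
lemma pv_foldl_enum (L : List (List (String × String))) :
    ∀ (i : Int) (acc : List String),
    (PySem.List.enumerate L i).foldl
      (fun steps ip => steps ++ [PySem.Int.toStr ip.1 ++ ". " ++ pvFmt ip.2]) acc
    = acc ++ altNumber i L := by
  induction L with
  | nil => intro i acc; simp [PySem.List.enumerate, altNumber]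
  | cons p t ih =>
      intro i acc
      rw [PySem.List.enumerate_cons]
      simp only [List.foldl_cons, altNumber]
      rw [ih (i + 1), altFmt_eq_pvFmt]
      simp

-- ===== VERDICT =====
theorem rule_based_action_plan_py_spec : Claim_equal_rule_based_action_plan_py := by
  intro pain_points _
  unfold Spec_rule_based_action_plan_py
  simp only [rule_based_action_plan_py, rule_based_action_plan_py_alt]
  rw [PySem.List.slice_to (PySem.List.sorted pain_points pvKey true)
      (show (0:Int) ≤ 5 by norm_num)]
  rw [pv_foldl_enum, altOrdered_eq_buckets, pv_sorted_eq_buckets]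
  simp
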